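-- pv_equiv track=rewrite | github.com/ttforsd/leetcode | 1269. Number of Ways to Stay in the Same Place After Some Steps.py | tb
-- ===== SOURCE A (Python) =====
-- def tb(steps, arrLen):
--     moves = [-1,0,1]
--     # steps, position
--     n = min(steps//2 + 1, arrLen)
--     dp = [[0 for i in range(n)] for i in range(steps + 1)]
--     dp[0][0] = 1
--     for i in range(1, len(dp)):
--         for j in range(len(dp[0])):
--             poss = 0
--             for move in moves:
--                 if j + move < 0 or j + move >= n:
--                     pass
--                 else:
--                     dp[i][j] += dp[i-1][j+move]
--     return dp[-1][0] % (10 ** 9 + 7)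
-- ===== SOURCE B (Python) =====
-- def tb(steps, arrLen):
--     # Top-down demand-driven memoization on states (remaining steps, position),
--     # run with an explicit DFS stack (post-order markers) instead of A's
--     # bottom-up fill of a dense (steps+1) x n table: only states reachable
--     # from the start are ever computed.
--     n = min(steps // 2 + 1, arrLen)
--     memo = {}
--     stack = [(steps, 0, False)]
--     while stack:
--         i, j, ready = stack.pop()
--         if (i, j) in memo:
--             continue
--         if i == 0:
--             memo[(i, j)] = 1 if j == 0 else 0
--         elif ready:
--             memo[(i, j)] = sum(memo[(i - 1, j + m)]
--                                for m in (-1, 0, 1) if 0 <= j + m < n)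
--         else:
--             stack.append((i, j, True))
--             for m in (-1, 0, 1):
--                 if 0 <= j + m < n and (i - 1, j + m) not in memo:
--                     stack.append((i - 1, j + m, False))
--     return memo[(steps, 0)] % (10 ** 9 + 7)
-- ===== Notes on version B (the rewrite author's own statement) =====
-- stated objective: alternative
-- what changed: Replaced A's bottom-up fill of a dense (steps+1) x n table by a top-down demand-driven memoization on states (remaining steps, position), run with an explicit post-order DFS stack and a dict cache, computing only states reachable from the start and taking the mod once at the end.
import Mathlib
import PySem

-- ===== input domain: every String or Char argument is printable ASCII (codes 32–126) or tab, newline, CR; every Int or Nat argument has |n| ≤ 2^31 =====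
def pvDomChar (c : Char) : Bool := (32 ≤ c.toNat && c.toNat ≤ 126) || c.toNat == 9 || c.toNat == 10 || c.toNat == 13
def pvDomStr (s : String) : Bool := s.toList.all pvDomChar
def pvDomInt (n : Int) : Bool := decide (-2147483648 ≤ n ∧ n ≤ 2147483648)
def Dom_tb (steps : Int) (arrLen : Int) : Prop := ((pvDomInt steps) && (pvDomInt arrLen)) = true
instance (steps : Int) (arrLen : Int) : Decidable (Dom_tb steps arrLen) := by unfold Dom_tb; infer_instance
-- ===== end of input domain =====

-- B replaces A's bottom-up fill of a dense 2-D table by a top-down demand-driven memoization over states (remaining steps, position), run with an explicit DFS stack: an alternative decomposition, same results.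

-- ===== PORT A =====
-- dp[i][j] read (indices at every use inside the loops are nonnegative)
def tbCget (dp : List (List Int)) (i j : Nat) : Int := (dp.getD i []).getD j 0
-- dp[i][j] += v
def tbCadd (dp : List (List Int)) (i j : Nat) (v : Int) : List (List Int) :=
  dp.set i ((dp.getD i []).set j ((dp.getD i []).getD j 0 + v))

def tb (steps : Int) (arrLen : Int) : Int :=
  let n : Int := min (PySem.Int.floordiv steps 2 + 1) arrLen
  let dp : List (List Int) :=
    (PySem.List.pyRange 0 (steps + 1) 1).map (fun _ =>
      (PySem.List.pyRange 0 n 1).map (fun _ => (0 : Int)))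
  let dp := dp.set 0 ((dp.getD 0 []).set 0 1)
  let dp :=
    (PySem.List.pyRange 1 (dp.length : Int) 1).foldl (fun dp i =>
      (PySem.List.pyRange 0 ((dp.getD 0 []).length : Int) 1).foldl (fun dp j =>
        [(-1 : Int), 0, 1].foldl (fun dp move =>
          if j + move < 0 ∨ n ≤ j + move then dp
          else tbCadd dp i.toNat j.toNat (tbCget dp (i.toNat - 1) (j + move).toNat)) dp) dp) dp
  PySem.Int.mod (((PySem.List.pyGet? dp (-1)).getD []).getD 0 0) (10 ^ 9 + 7)

-- ===== PORT B =====
-- Source B's while-loop over the explicit DFS stack; `fuel` only makes the loop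
-- total in Lean (it is generous enough on every admitted input and is proved
-- never to run out there); each iteration is one iteration of Source B's loop.
-- `.getD 0` ports Python's memo[c] (KeyError on a missing key, which cannot
-- occur on admitted inputs: the marker entry is popped only after all its
-- valid children were memoized).
def tbLoop (n : Int) : Nat → List (Int × Int × Bool) → PySem.Dict (Int × Int) Int → PySem.Dict (Int × Int) Int
  | 0, _, memo => memo
  | _ + 1, [], memo => memo
  | fuel + 1, (i, j, ready) :: rest, memo =>
    if PySem.Dict.contains memo (i, j) then tbLoop n fuel rest memo
    else if i = 0 then
      tbLoop n fuel rest (PySem.Dict.insert memo (i, j) (if j = 0 then 1 else 0))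
    else if ready then
      tbLoop n fuel rest (PySem.Dict.insert memo (i, j)
        ((if 0 ≤ j + -1 ∧ j + -1 < n then (PySem.Dict.get? memo (i - 1, j + -1)).getD 0 else 0)
          + (if 0 ≤ j + 0 ∧ j + 0 < n then (PySem.Dict.get? memo (i - 1, j + 0)).getD 0 else 0)
          + (if 0 ≤ j + 1 ∧ j + 1 < n then (PySem.Dict.get? memo (i - 1, j + 1)).getD 0 else 0)))
    else
      -- push the marker, then the missing valid children for m = -1, 0, 1
      -- (the head of the Lean list is the top of Python's stack)
      let push := fun (m : Int) (st : List (Int × Int × Bool)) =>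
        if 0 ≤ j + m ∧ j + m < n ∧ ¬ PySem.Dict.contains memo (i - 1, j + m) then
          (i - 1, j + m, false) :: st else st
      tbLoop n fuel (push 1 (push 0 (push (-1) ((i, j, true) :: rest)))) memo

def tb_alt (steps : Int) (arrLen : Int) : Int :=
  let n : Int := min (PySem.Int.floordiv steps 2 + 1) arrLen
  let memo := tbLoop n (4 ^ (steps.toNat + 1) + 1) [(steps, 0, false)] PySem.Dict.empty
  PySem.Int.mod ((PySem.Dict.get? memo (steps, 0)).getD 0) (10 ^ 9 + 7)

-- ===== PRECONDITION & SPEC =====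
-- Python A raises IndexError when steps < 0 (dp is the empty list) or arrLen ≤ 0 (row 0 is empty).
def Pre_tb (steps : Int) (arrLen : Int) : Prop := 0 ≤ steps ∧ 1 ≤ arrLen
instance (steps : Int) (arrLen : Int) : Decidable (Pre_tb steps arrLen) := by unfold Pre_tb; infer_instance
def pvWitness_tb : Int × Int := (3, 2)

def Spec_tb (steps : Int) (arrLen : Int) (out : Int) : Prop := out = tb_alt steps arrLen
instance (steps : Int) (arrLen : Int) (out : Int) : Decidable (Spec_tb steps arrLen out) := by unfold Spec_tb; infer_instance

-- ===== CLAIM (what is proved, stated in full; the proofs are below) =====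
def Claim_equal_tb : Prop := ∀ (steps : Int) (arrLen : Int), Dom_tb steps arrLen → Pre_tb steps arrLen → Spec_tb steps arrLen (tb steps arrLen)

-- ===== LEMMAS AND PROOFS =====

def W (n : Int) : Nat → Int → Int
  | 0, j => if j = 0 then 1 else 0
  | i + 1, j =>
      (if 0 ≤ j - 1 ∧ j - 1 < n then W n i (j - 1) else 0) +
      (if 0 ≤ j ∧ j < n then W n i j else 0) +
      (if 0 ≤ j + 1 ∧ j + 1 < n then W n i (j + 1) else 0)

def rowW (n : Int) (i : Nat) : List Int := (List.range n.toNat).map (fun j : Nat => W n i (j : Int))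
def zrow (N : Nat) : List Int := List.replicate N 0
def partRow (n : Int) (i : Nat) (m : Nat) : List Int :=
  (List.range n.toNat).map (fun j : Nat => if j < m then W n i (j : Int) else 0)
def tbl (n : Int) (S : Nat) (i : Nat) : List (List Int) :=
  (List.range (S + 1)).map (fun k => if k ≤ i then rowW n k else zrow n.toNat)

lemma getD_set_self {α} (l : List α) (i : Nat) (a : α) (d : α) (h : i < l.length) :
    (l.set i a).getD i d = a := by
  simp [List.getD, h]

lemma getD_set_ne {α} (l : List α) (i k : Nat) (a : α) (d : α) (h : i ≠ k) :
    (l.set i a).getD k d = l.getD k d := by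
  simp [List.getD, List.getElem?_set_ne h]

lemma getD_map_range (f : Nat → Int) (N k : Nat) (h : k < N) :
    (((List.range N).map f).getD k 0) = f k := by
  simp [List.getD, h]

lemma length_partRow (n : Int) (i m : Nat) : (partRow n i m).length = n.toNat := by
  simp [partRow]

lemma partRow_set (n : Int) (I m : Nat) (hm : m < n.toNat) :
    (partRow n I m).set m (W n I (m : Int)) = partRow n I (m + 1) := by
  apply List.ext_getElem (by simp [partRow])
  intro k h1 h2
  simp only [partRow, List.getElem_set, List.getElem_map, List.getElem_range]
  by_cases hk : m = k
  · subst hk; rw [if_pos rfl, if_pos (by omega)]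
  · by_cases h2k : k < m
    · rw [if_neg hk, if_pos h2k, if_pos (by omega)]
    · rw [if_neg hk, if_neg h2k, if_neg (by omega)]

lemma partRow_last (n : Int) (I : Nat) : partRow n I n.toNat = rowW n I := by
  apply List.ext_getElem (by simp [partRow, rowW])
  intro k h1 h2
  have hk : k < n.toNat := by simpa [partRow] using h1
  simp only [partRow, rowW, List.getElem_map, List.getElem_range]
  rw [if_pos hk]

lemma partRow_zero (n : Int) (I : Nat) : partRow n I 0 = zrow n.toNat := by
  apply List.ext_getElem (by simp [partRow, zrow])
  intro k h1 h2
  simp [partRow, zrow]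

lemma cadd_eval (dp0 : List (List Int)) (Ip : Nat) (r : List Int) (m : Nat) (v : Int)
    (hlen : Ip + 1 < dp0.length) :
    tbCadd (dp0.set (Ip + 1) r) (Ip + 1) m v
      = dp0.set (Ip + 1) (r.set m (r.getD m 0 + v)) := by
  unfold tbCadd
  rw [getD_set_self _ _ _ _ (by simpa using hlen), List.set_set]

lemma cget_prev (dp0 : List (List Int)) (Ip : Nat) (r : List Int) (k : Nat) :
    tbCget (dp0.set (Ip + 1) r) Ip k = (dp0.getD Ip []).getD k 0 := by
  unfold tbCget
  rw [getD_set_ne _ _ _ _ _ (by omega)]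

lemma getD_rowW (n : Int) (I k : Nat) (h : k < n.toNat) :
    (rowW n I).getD k 0 = W n I (k : Int) := by
  rw [rowW, getD_map_range _ _ _ h]

lemma getD_partRow_self (n : Int) (I m : Nat) (h : m < n.toNat) :
    (partRow n I m).getD m 0 = 0 := by
  rw [partRow, getD_map_range _ _ _ h]; simp

lemma inner_cell (n : Int) (dp0 : List (List Int)) (Ip m : Nat) (i j : Int)
    (hi : i = (Ip : Int) + 1) (hj : j = (m : Int))
    (hm : (m : Int) < n)
    (hlen : Ip + 1 < dp0.length)
    (hprev : dp0.getD Ip [] = rowW n Ip) :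
    [(-1 : Int), 0, 1].foldl
      (fun dp move => if j + move < 0 ∨ n ≤ j + move then dp
        else tbCadd dp i.toNat j.toNat (tbCget dp (i.toNat - 1) (j + move).toNat))
      (dp0.set (Ip + 1) (partRow n (Ip + 1) m))
    = dp0.set (Ip + 1) (partRow n (Ip + 1) (m + 1)) := by
  subst hi hj
  have hN : m < n.toNat := by omega
  have hitn : ((Ip : Int) + 1).toNat = Ip + 1 := by omega
  have hjtn : ((m : Int)).toNat = m := by omega
  have hrlen : m < (partRow n (Ip + 1) m).length := by rw [length_partRow]; exact hN
  simp only [List.foldl, hitn, Nat.add_sub_cancel]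
  have step2 : ¬ ((m : Int) + 0 < 0 ∨ n ≤ (m : Int) + 0) := by omega
  have hmid : ((m : Int) + 0).toNat = m := by omega
  have hadd : ((m : Int) + 1).toNat = m + 1 := by omega
  by_cases h1c : (m : Int) + -1 < 0 ∨ n ≤ (m : Int) + -1
  · by_cases h3c : (m : Int) + 1 < 0 ∨ n ≤ (m : Int) + 1
    · simp only [if_pos h1c, if_neg step2, if_pos h3c]
      simp only [hjtn, hmid, hadd]
      rw [cadd_eval _ _ _ _ _ hlen, cget_prev, hprev]
      rw [getD_partRow_self _ _ _ hN, getD_rowW _ _ _ hN]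
      rw [← partRow_set n (Ip + 1) m hN]
      congr 1
      rw [W]
      rw [if_neg (by omega), if_pos (by constructor <;> omega), if_neg (by omega)]
      congr 1
      push_cast
      simp
    · simp only [if_pos h1c, if_neg step2, if_neg h3c]
      simp only [hjtn, hmid, hadd]
      rw [cadd_eval _ _ _ _ _ hlen, cget_prev, hprev]
      rw [cadd_eval _ _ _ _ _ hlen, cget_prev, hprev, List.set_set]
      rw [getD_partRow_self _ _ _ hN, getD_rowW _ _ _ hN]
      rw [getD_set_self _ _ _ _ hrlen]
      rw [getD_rowW _ _ _ (by omega)]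
      rw [← partRow_set n (Ip + 1) m hN]
      congr 1
      rw [W]
      rw [if_neg (by omega), if_pos (by constructor <;> omega), if_pos (by constructor <;> omega)]
      push_cast
      first
      | ring
      | simp
  · have hm1 : 1 ≤ m := by omega
    have hsub : ((m : Int) + -1).toNat = m - 1 := by omega
    have hcast1 : ((m - 1 : Nat) : Int) = (m : Int) - 1 := by omega
    by_cases h3c : (m : Int) + 1 < 0 ∨ n ≤ (m : Int) + 1
    · simp only [if_neg h1c, if_neg step2, if_pos h3c]
      simp only [hjtn, hmid, hadd, hsub]
      rw [cadd_eval _ _ _ _ _ hlen, cget_prev, hprev]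
      rw [cadd_eval _ _ _ _ _ hlen, cget_prev, hprev, List.set_set]
      rw [getD_partRow_self _ _ _ hN, getD_set_self _ _ _ _ hrlen]
      rw [getD_rowW _ _ _ (by omega), getD_rowW _ _ _ hN]
      rw [← partRow_set n (Ip + 1) m hN]
      congr 1
      rw [W]
      rw [if_pos (by constructor <;> omega), if_pos (by constructor <;> omega), if_neg (by omega)]
      rw [hcast1]
      push_cast
      first
      | ring
      | simp
    · simp only [if_neg h1c, if_neg step2, if_neg h3c]
      simp only [hjtn, hmid, hadd, hsub]
      rw [cadd_eval _ _ _ _ _ hlen, cget_prev, hprev]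
      rw [cadd_eval _ _ _ _ _ hlen, cget_prev, hprev, List.set_set]
      rw [cadd_eval _ _ _ _ _ hlen, cget_prev, hprev, List.set_set]
      rw [getD_partRow_self _ _ _ hN, getD_set_self _ _ _ _ hrlen, getD_set_self _ _ _ _ hrlen]
      rw [getD_rowW _ _ _ (by omega), getD_rowW _ _ _ hN]
      rw [getD_rowW _ _ _ (by omega)]
      rw [← partRow_set n (Ip + 1) m hN]
      congr 1
      rw [W]
      rw [if_pos (by constructor <;> omega), if_pos (by constructor <;> omega), if_pos (by constructor <;> omega)]
      rw [hcast1]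
      push_cast
      first
      | ring
      | simp

lemma getD_map_range' {α} (f : Nat → α) (d : α) (N k : Nat) (h : k < N) :
    (((List.range N).map f).getD k d) = f k := by
  simp [List.getD, h]

lemma inner_fold (n : Int) (dp0 : List (List Int)) (Ip : Nat) (i : Int)
    (hi : i = (Ip : Int) + 1)
    (hlen : Ip + 1 < dp0.length)
    (hprev : dp0.getD Ip [] = rowW n Ip) :
    ∀ m : Nat, (m : Int) ≤ n →
      (PySem.List.pyRange 0 (m : Int) 1).foldl
        (fun dp j => [(-1 : Int), 0, 1].foldl
          (fun dp move => if j + move < 0 ∨ n ≤ j + move then dp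
            else tbCadd dp i.toNat j.toNat (tbCget dp (i.toNat - 1) (j + move).toNat)) dp)
        (dp0.set (Ip + 1) (partRow n (Ip + 1) 0))
      = dp0.set (Ip + 1) (partRow n (Ip + 1) m) := by
  intro m
  induction m with
  | zero =>
    intro _
    rw [PySem.List.pyRange_one_eq_nil (by omega)]
    simp
  | succ m ih =>
    intro hmn
    have h1 : ((m + 1 : Nat) : Int) = (m : Int) + 1 := by push_cast; ring
    rw [h1, PySem.List.pyRange_one_succ_right (by omega), List.foldl_append,
      ih (by omega)]
    simp only [List.foldl]
    exact inner_cell n dp0 Ip m i (m : Int) hi rfl (by omega) hlen hprev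

lemma length_tbl (n : Int) (S b : Nat) : (tbl n S b).length = S + 1 := by
  simp [tbl]

lemma getD_tbl (n : Int) (S b k : Nat) (h : k < S + 1) :
    (tbl n S b).getD k [] = if k ≤ b then rowW n k else zrow n.toNat := by
  rw [tbl, getD_map_range' _ _ _ _ h]

lemma tbl_start (n : Int) (S b : Nat) (h : b + 1 ≤ S) :
    tbl n S b = (tbl n S b).set (b + 1) (partRow n (b + 1) 0) := by
  apply List.ext_getElem (by simp)
  intro k h1 h2
  rw [List.getElem_set]
  split
  · next heq =>
    subst heq
    rw [partRow_zero]
    simp only [tbl, List.getElem_map, List.getElem_range]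
    rw [if_neg (by omega)]
  · rfl

lemma tbl_finish (n : Int) (S b : Nat) (h : b + 1 ≤ S) :
    (tbl n S b).set (b + 1) (rowW n (b + 1)) = tbl n S (b + 1) := by
  apply List.ext_getElem (by simp [tbl])
  intro k h1 h2
  rw [List.getElem_set]
  simp only [tbl, List.getElem_map, List.getElem_range]
  split
  · next heq => subst heq; rw [if_pos (by omega)]
  · next hne =>
    by_cases hk : k ≤ b
    · rw [if_pos hk, if_pos (by omega)]
    · rw [if_neg hk, if_neg (by omega)]

lemma outer_fold (n : Int) (S : Nat) (hn : 1 ≤ n) :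
    ∀ b : Nat, b ≤ S →
      (PySem.List.pyRange 1 ((b : Int) + 1) 1).foldl
        (fun dp i => (PySem.List.pyRange 0 (((dp.getD 0 []).length : Int)) 1).foldl
          (fun dp j => [(-1 : Int), 0, 1].foldl
            (fun dp move => if j + move < 0 ∨ n ≤ j + move then dp
              else tbCadd dp i.toNat j.toNat (tbCget dp (i.toNat - 1) (j + move).toNat)) dp) dp)
        (tbl n S 0)
      = tbl n S b := by
  intro b
  induction b with
  | zero =>
    intro _
    rw [PySem.List.pyRange_one_eq_nil (by omega)]
    simp
  | succ b ih =>
    intro hbS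
    have h1 : ((b + 1 : Nat) : Int) = (b : Int) + 1 := by push_cast; ring
    rw [h1, PySem.List.pyRange_one_succ_right (by omega), List.foldl_append,
      ih (by omega)]
    rw [List.foldl_cons, List.foldl_nil]
    beta_reduce
    have hrow0 : (tbl n S b).getD 0 [] = rowW n 0 := by
      rw [getD_tbl n S b 0 (by omega), if_pos (by omega)]
    rw [hrow0]
    have hlenrow : ((rowW n 0).length : Int) = ((n.toNat : Nat) : Int) := by
      simp [rowW]
    rw [hlenrow]
    conv_lhs => rw [tbl_start n S b (by omega)]
    rw [inner_fold n (tbl n S b) b ((b : Int) + 1) rfl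
      (by rw [length_tbl]; omega)
      (by rw [getD_tbl n S b b (by omega), if_pos (by omega)])
      n.toNat (by omega)]
    rw [partRow_last, tbl_finish n S b (by omega)]

lemma map_const_replicate {α β : Type} (l : List α) (c : β) :
    l.map (fun _ => c) = List.replicate l.length c := by
  induction l with
  | nil => rfl
  | cons x xs ih => simp [ih, List.replicate_succ]

lemma zrow_set_one (n : Int) (hn : 1 ≤ n) : (zrow n.toNat).set 0 1 = rowW n 0 := by
  apply List.ext_getElem (by simp [zrow, rowW])
  intro k h1 h2
  rw [List.getElem_set]
  simp only [rowW, List.getElem_map, List.getElem_range, W]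
  split
  · next heq => rw [if_pos (by omega)]
  · next hne =>
    rw [if_neg (by omega)]
    simp [zrow]

lemma replicate_set_tbl0 (n : Int) (S : Nat) :
    (List.replicate (S + 1) (zrow n.toNat)).set 0 (rowW n 0) = tbl n S 0 := by
  apply List.ext_getElem (by simp [tbl])
  intro k h1 h2
  rw [List.getElem_set]
  simp only [tbl, List.getElem_map, List.getElem_range]
  split
  · next heq => subst heq; rw [if_pos (by omega)]
  · next hne => rw [if_neg (by omega)]; simp

lemma tb_eq_W (steps arrLen : Int) (h0 : 0 ≤ steps) (h1 : 1 ≤ arrLen) :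
    tb steps arrLen
      = PySem.Int.mod (W (min (PySem.Int.floordiv steps 2 + 1) arrLen) steps.toNat 0) (10 ^ 9 + 7) := by
  have hfd : 0 ≤ PySem.Int.floordiv steps 2 := by
    rw [PySem.Int.floordiv_eq_ediv_of_pos (by omega)]
    exact Int.ediv_nonneg h0 (by omega)
  set n := min (PySem.Int.floordiv steps 2 + 1) arrLen with hn
  have hn1 : 1 ≤ n := le_min (by omega) h1
  set S := steps.toNat with hS
  clear_value n S
  simp only [tb, ← hn]
  have hinit : (List.map (fun _ => List.map (fun _ => (0 : Int)) (PySem.List.pyRange 0 n 1))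
      (PySem.List.pyRange 0 (steps + 1) 1)) = List.replicate (S + 1) (zrow n.toNat) := by
    rw [map_const_replicate, map_const_replicate,
      PySem.List.length_pyRange_one, PySem.List.length_pyRange_one]
    rw [zrow]
    have e1 : (steps + 1 - 0).toNat = S + 1 := by omega
    have e2 : (n - 0).toNat = n.toNat := by omega
    rw [e1, e2]
  rw [hinit]
  have hget0 : (List.replicate (S + 1) (zrow n.toNat)).getD 0 [] = zrow n.toNat := by
    simp [List.getD]
  rw [hget0, zrow_set_one n hn1, replicate_set_tbl0]
  rw [length_tbl]
  have hc : ((S + 1 : Nat) : Int) = (S : Int) + 1 := by push_cast; ring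
  rw [hc, outer_fold n S hn1 S le_rfl]
  rw [PySem.List.pyGet?_neg_one]
  have hlast : (tbl n S S).getLast? = some (rowW n S) := by
    rw [List.getLast?_eq_getElem?, length_tbl, Nat.add_sub_cancel]
    rw [List.getElem?_eq_getElem (by rw [length_tbl]; omega)]
    simp only [tbl, List.getElem_map, List.getElem_range, le_refl, if_pos]
  rw [hlast]
  simp only [Option.getD_some]
  rw [getD_rowW n S 0 (by omega)]
  norm_num

-- ===== B-side: a memo invariant (every entry records a value of W) and a fuel-indexed
-- simulation of the stack loop show tb_alt computes W as well =====
def GoodMemo (n : Int) (memo : PySem.Dict (Int × Int) Int) : Prop :=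
  ∀ (a b v : Int), PySem.Dict.get? memo (a, b) = some v → 0 ≤ a ∧ v = W n a.toNat b

def MemoLe (m m' : PySem.Dict (Int × Int) Int) : Prop :=
  ∀ k v, PySem.Dict.get? m k = some v → PySem.Dict.get? m' k = some v

lemma memoLe_refl (m : PySem.Dict (Int × Int) Int) : MemoLe m m := fun _ _ h => h
lemma memoLe_trans {a b c : PySem.Dict (Int × Int) Int} (h1 : MemoLe a b) (h2 : MemoLe b c) :
    MemoLe a c := fun k v h => h2 k v (h1 k v h)

lemma W_unroll (n : Int) (i : Nat) (j : Int) :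
    W n (i + 1) j =
      (if 0 ≤ j + -1 ∧ j + -1 < n then W n i (j + -1) else 0) +
      (if 0 ≤ j + 0 ∧ j + 0 < n then W n i (j + 0) else 0) +
      (if 0 ≤ j + 1 ∧ j + 1 < n then W n i (j + 1) else 0) := by
  rw [W]
  have e1 : j + -1 = j - 1 := by ring
  have e2 : j + 0 = j := by ring
  rw [e1, e2]

lemma good_insertA (n a j v : Int) (memo : PySem.Dict (Int × Int) Int)
    (hg : GoodMemo n memo) (ha : 0 ≤ a) (hv : v = W n a.toNat j) :
    GoodMemo n (PySem.Dict.insert memo (a, j) v) := by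
  intro a' b w hw
  rw [PySem.Dict.get?_insert] at hw
  split_ifs at hw with heq
  · have ha' : a' = a := (Prod.ext_iff.mp heq).1
    have hb : b = j := (Prod.ext_iff.mp heq).2
    cases hw
    exact ⟨by omega, by rw [hv, ha', hb]⟩
  · exact hg a' b w hw

lemma memoLe_insert (m : PySem.Dict (Int × Int) Int) (k : Int × Int) (v : Int)
    (hk : PySem.Dict.get? m k = none) : MemoLe m (PySem.Dict.insert m k v) := by
  intro k' v' h
  rw [PySem.Dict.get?_insert]
  split_ifs with he
  · rw [he] at h; rw [h] at hk; cases hk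
  · exact h

lemma contains_false_get? (m : PySem.Dict (Int × Int) Int) (k : Int × Int)
    (h : PySem.Dict.contains m k = false) : PySem.Dict.get? m k = none := by
  have := PySem.Dict.contains_eq_isSome_get? (d := m) (k := k)
  rw [h] at this
  cases hg : PySem.Dict.get? m k with
  | none => rfl
  | some v => rw [hg] at this; simp at this

-- one-iteration unfolds
lemma tbLoop_nil (n : Int) (fuel : Nat) (memo : PySem.Dict (Int × Int) Int) (h : 1 ≤ fuel) :
    tbLoop n fuel [] memo = memo := by
  cases fuel with
  | zero => omega
  | succ f => rfl

-- membership of a key gives its W-value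
lemma good_contains (n : Int) (memo : PySem.Dict (Int × Int) Int) (hg : GoodMemo n memo)
    (i : Nat) (j : Int) (hc : PySem.Dict.contains memo ((i : Int), j) = true) :
    PySem.Dict.get? memo ((i : Int), j) = some (W n i j) := by
  have hs : (PySem.Dict.get? memo ((i : Int), j)).isSome := by
    rw [← PySem.Dict.contains_eq_isSome_get?]; exact hc
  obtain ⟨v, hv⟩ := Option.isSome_iff_exists.mp hs
  obtain ⟨_, hw⟩ := hg _ _ _ hv
  rw [hv, hw, Int.toNat_natCast]

-- popping the post-order marker ((i+1 : Int), j, true): all valid children are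
-- memoized, so one iteration computes and records W n (i+1) j
lemma tbLoop_marker (n : Int) (i : Nat) (j : Int) (S : List (Int × Int × Bool))
    (memo : PySem.Dict (Int × Int) Int) (fuel : Nat)
    (hg : GoodMemo n memo) (hf : 1 ≤ fuel)
    (hch : ∀ m : Int, m = -1 ∨ m = 0 ∨ m = 1 → 0 ≤ j + m ∧ j + m < n →
      PySem.Dict.get? memo ((i : Int), j + m) = some (W n i (j + m))) :
    ∃ (memo' : PySem.Dict (Int × Int) Int),
      tbLoop n fuel (((i : Int) + 1, j, true) :: S) memo = tbLoop n (fuel - 1) S memo' ∧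
      GoodMemo n memo' ∧ MemoLe memo memo' ∧
      PySem.Dict.get? memo' ((i : Int) + 1, j) = some (W n (i + 1) j) := by
  obtain ⟨f, rfl⟩ : ∃ f, fuel = f + 1 := ⟨fuel - 1, by omega⟩
  rw [tbLoop]
  have ecast : ((i + 1 : Nat) : Int) = (i : Int) + 1 := by push_cast; ring
  by_cases hc : PySem.Dict.contains memo ((i : Int) + 1, j) = true
  · rw [if_pos hc]
    have := good_contains n memo hg (i + 1) j (by rw [ecast]; exact hc)
    rw [ecast] at this
    exact ⟨memo, by simp, hg, memoLe_refl memo, this⟩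
  · rw [if_neg hc, if_neg (by omega), if_pos rfl]
    have hnone := contains_false_get? memo _ (by simpa using hc)
    have e1 : (i : Int) + 1 - 1 = (i : Int) := by ring
    have g : ∀ m : Int, m = -1 ∨ m = 0 ∨ m = 1 →
        (if 0 ≤ j + m ∧ j + m < n then (PySem.Dict.get? memo ((i : Int) + 1 - 1, j + m)).getD 0 else 0)
          = (if 0 ≤ j + m ∧ j + m < n then W n i (j + m) else 0) := by
      intro m hm
      split_ifs with hcnd
      · rw [e1, hch m hm hcnd]; rfl
      · rfl
    have hval : ((if 0 ≤ j + -1 ∧ j + -1 < n then (PySem.Dict.get? memo ((i : Int) + 1 - 1, j + -1)).getD 0 else 0)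
          + (if 0 ≤ j + 0 ∧ j + 0 < n then (PySem.Dict.get? memo ((i : Int) + 1 - 1, j + 0)).getD 0 else 0)
          + (if 0 ≤ j + 1 ∧ j + 1 < n then (PySem.Dict.get? memo ((i : Int) + 1 - 1, j + 1)).getD 0 else 0))
        = W n (i + 1) j := by
      rw [g (-1) (by norm_num), g 0 (by norm_num), g 1 (by norm_num), ← W_unroll]
    refine ⟨_, rfl, ?_, memoLe_insert _ _ _ hnone, ?_⟩
    · refine good_insertA n ((i : Int) + 1) j _ memo hg (by omega) ?_
      rw [show ((i : Int) + 1).toNat = i + 1 from by omega]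
      exact hval
    · rw [PySem.Dict.get?_insert, if_pos rfl, hval]

-- The simulation: popping an unready entry ((i : Int), j) resolves it to W n i j.
lemma tbLoop_sim (n : Int) :
    ∀ (i : Nat) (j : Int) (S : List (Int × Int × Bool)) (memo : PySem.Dict (Int × Int) Int)
      (fuel : Nat), GoodMemo n memo → 4 ^ (i + 1) ≤ fuel →
      ∃ (fuel' : Nat) (memo' : PySem.Dict (Int × Int) Int),
        fuel - 4 ^ (i + 1) ≤ fuel' ∧ fuel' ≤ fuel ∧
        tbLoop n fuel (((i : Int), j, false) :: S) memo = tbLoop n fuel' S memo' ∧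
        GoodMemo n memo' ∧ MemoLe memo memo' ∧
        PySem.Dict.get? memo' ((i : Int), j) = some (W n i j) := by
  intro i
  induction i with
  | zero =>
    intro j S memo fuel hg hf
    obtain ⟨f, rfl⟩ : ∃ f, fuel = f + 1 := ⟨fuel - 1, by omega⟩
    rw [tbLoop]
    simp only [Nat.cast_zero]
    by_cases hc : PySem.Dict.contains memo ((0 : Int), j) = true
    · rw [if_pos hc]
      have := good_contains n memo hg 0 j (by exact_mod_cast hc)
      exact ⟨f, memo, by omega, by omega, rfl, hg, memoLe_refl memo, by exact_mod_cast this⟩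
    · rw [if_neg hc, if_pos trivial]
      have hnone := contains_false_get? memo _ (by simpa using hc)
      refine ⟨f, _, by omega, by omega, rfl, ?_, memoLe_insert _ _ _ hnone, ?_⟩
      · exact good_insertA n 0 j _ memo hg le_rfl (by rw [show ((0 : Int)).toNat = 0 from rfl, W])
      · rw [PySem.Dict.get?_insert, if_pos rfl, W]
  | succ i ih =>
    intro j S memo fuel hg hf
    have hp1 : 1 ≤ 4 ^ (i + 1) := Nat.one_le_pow _ _ (by norm_num)
    have hp2 : (4 : Nat) ^ (i + 1 + 1) = 4 * 4 ^ (i + 1) := by ring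
    obtain ⟨f, rfl⟩ : ∃ f, fuel = f + 1 := ⟨fuel - 1, by omega⟩
    rw [tbLoop]
    have ecast : ((i + 1 : Nat) : Int) = (i : Int) + 1 := by push_cast; ring
    simp only [ecast]
    by_cases hc : PySem.Dict.contains memo ((i : Int) + 1, j) = true
    · rw [if_pos hc]
      have := good_contains n memo hg (i + 1) j (by rw [ecast]; exact hc)
      rw [ecast] at this
      exact ⟨f, memo, by omega, by omega, rfl, hg, memoLe_refl memo, this⟩
    · rw [if_neg hc, if_neg (by omega), if_neg (by simp)]
      have e1 : (i : Int) + 1 - 1 = (i : Int) := by ring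
      simp only [List.foldl_cons, List.foldl_nil, e1]
      -- name the three push conditions
      set c1 : Prop := 0 ≤ j + -1 ∧ j + -1 < n ∧ ¬ PySem.Dict.contains memo ((i : Int), j + -1) = true with hc1
      set c2 : Prop := 0 ≤ j + 0 ∧ j + 0 < n ∧ ¬ PySem.Dict.contains memo ((i : Int), j + 0) = true with hc2
      set c3 : Prop := 0 ≤ j + 1 ∧ j + 1 < n ∧ ¬ PySem.Dict.contains memo ((i : Int), j + 1) = true with hc3
      -- the pushed stack, as a mapped candidate list on top of the marker
      have hstack : ∀ (X : List (Int × Int × Bool)),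
          (if c3 then ((i : Int), j + 1, false) ::
              (if c2 then ((i : Int), j + 0, false) ::
                (if c1 then ((i : Int), j + -1, false) :: X else X)
               else (if c1 then ((i : Int), j + -1, false) :: X else X))
           else (if c2 then ((i : Int), j + 0, false) ::
                (if c1 then ((i : Int), j + -1, false) :: X else X)
               else (if c1 then ((i : Int), j + -1, false) :: X else X)))
          = ((if c3 then [j + 1] else []) ++ (if c2 then [j + 0] else []) ++
             (if c1 then [j + -1] else [])).map (fun jc => ((i : Int), jc, false)) ++ X := by
        intro X
        by_cases h3 : c3 <;> by_cases h2 : c2 <;> by_cases h1 : c1 <;>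
          simp [h1, h2, h3]
      -- process the candidate list
      set cs : List Int := (if c3 then [j + 1] else []) ++ (if c2 then [j + 0] else []) ++
          (if c1 then [j + -1] else []) with hcs
      have hlen : cs.length ≤ 3 := by
        rw [hcs]
        by_cases h3 : c3 <;> by_cases h2 : c2 <;> by_cases h1 : c1 <;> simp [h1, h2, h3]
      have csim : ∀ (cs' : List Int) (S' : List (Int × Int × Bool))
          (memo' : PySem.Dict (Int × Int) Int) (fuel' : Nat), GoodMemo n memo' →
          cs'.length * 4 ^ (i + 1) ≤ fuel' →
          ∃ (fuel'' : Nat) (memo'' : PySem.Dict (Int × Int) Int),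
            fuel' - cs'.length * 4 ^ (i + 1) ≤ fuel'' ∧ fuel'' ≤ fuel' ∧
            tbLoop n fuel' (cs'.map (fun jc => ((i : Int), jc, false)) ++ S') memo'
              = tbLoop n fuel'' S' memo'' ∧
            GoodMemo n memo'' ∧ MemoLe memo' memo'' ∧
            ∀ jc ∈ cs', PySem.Dict.get? memo'' ((i : Int), jc) = some (W n i jc) := by
        intro cs'
        induction cs' with
        | nil =>
          intro S' memo' fuel' hg' _
          exact ⟨fuel', memo', by omega, le_rfl, by simp, hg', memoLe_refl _, by simp⟩
        | cons jc cs' ihc =>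
          intro S' memo' fuel' hg' hfl
          simp only [List.length_cons] at hfl
          have hmul : (cs'.length + 1) * 4 ^ (i + 1)
              = cs'.length * 4 ^ (i + 1) + 4 ^ (i + 1) := by ring
          obtain ⟨f1, m1, hf1a, hf1b, heq1, hg1, hle1, hget1⟩ :=
            ih jc (cs'.map (fun jc => ((i : Int), jc, false)) ++ S') memo' fuel' hg'
              (by omega)
          obtain ⟨f2, m2, hf2a, hf2b, heq2, hg2, hle2, hget2⟩ :=
            ihc S' m1 f1 hg1 (by omega)
          refine ⟨f2, m2, by simp only [List.length_cons]; omega, by omega, ?_, hg2, memoLe_trans hle1 hle2, ?_⟩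
          · rw [List.map_cons, List.cons_append, heq1, heq2]
          · intro jc' hjc'
            rcases List.mem_cons.mp hjc' with h | h
            · subst h; exact hle2 _ _ hget1
            · exact hget2 jc' h
      have hcs3 : cs.length * 4 ^ (i + 1) ≤ 3 * 4 ^ (i + 1) :=
        Nat.mul_le_mul_right _ hlen
      have hp4 : 4 ≤ 4 ^ (i + 1) := by
        calc (4 : Nat) = 4 ^ 1 := by norm_num
        _ ≤ 4 ^ (i + 1) := Nat.pow_le_pow_right (by norm_num) (by omega)
      obtain ⟨f1, m1, hf1a, hf1b, heq1, hg1, hle1, hget1⟩ :=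
        csim cs (((i : Int) + 1, j, true) :: S) memo f hg (by omega)
      -- now the marker
      have hch : ∀ m : Int, m = -1 ∨ m = 0 ∨ m = 1 → 0 ≤ j + m ∧ j + m < n →
          PySem.Dict.get? m1 ((i : Int), j + m) = some (W n i (j + m)) := by
        intro m hm hcnd
        by_cases hmem : PySem.Dict.contains memo ((i : Int), j + m) = true
        · exact hle1 _ _ (good_contains n memo hg i (j + m) hmem)
        · have : (j + m) ∈ cs := by
            rw [hcs]
            rcases hm with rfl | rfl | rfl <;>
              simp only [List.mem_append, List.mem_singleton] <;>
              [ (right; rw [if_pos (by exact ⟨hcnd.1, hcnd.2, hmem⟩)]; simp);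
                (left; right; rw [if_pos (by exact ⟨hcnd.1, hcnd.2, hmem⟩)]; simp);
                (left; left; rw [if_pos (by exact ⟨hcnd.1, hcnd.2, hmem⟩)]; simp) ]
          exact hget1 _ this
      have hfm : 1 ≤ f1 := by omega
      obtain ⟨m2, heq2, hg2, hle2, hget2⟩ := tbLoop_marker n i j S m1 f1 hg1 hfm hch
      refine ⟨f1 - 1, m2, by omega, by omega, ?_, hg2, memoLe_trans hle1 hle2, hget2⟩
      rw [hstack, heq1, heq2]

lemma alt_value (steps arrLen : Int) (h0 : 0 ≤ steps) :
    tb_alt steps arrLen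
      = PySem.Int.mod (W (min (PySem.Int.floordiv steps 2 + 1) arrLen) steps.toNat 0) (10 ^ 9 + 7) := by
  set n := min (PySem.Int.floordiv steps 2 + 1) arrLen with hn
  have hg : GoodMemo n PySem.Dict.empty := by
    intro a b v h
    rw [PySem.Dict.get?_empty] at h
    cases h
  obtain ⟨f1, m1, hf1a, hf1b, heq1, hg1, hle1, hget1⟩ :=
    tbLoop_sim n steps.toNat 0 [] PySem.Dict.empty (4 ^ (steps.toNat + 1) + 1) hg (by omega)
  have hst : ((steps.toNat : Int), (0 : Int), false) = (steps, 0, false) := by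
    rw [Int.toNat_of_nonneg h0]
  rw [hst] at heq1
  have hf1 : 1 ≤ f1 := by omega
  simp only [tb_alt, ← hn, heq1, tbLoop_nil n f1 m1 hf1]
  rw [show (steps, (0 : Int)) = ((steps.toNat : Int), (0 : Int)) from by rw [Int.toNat_of_nonneg h0]]
  rw [hget1]
  rfl

-- ===== VERDICT (by name: the statement is the Claim_ definition above) =====
theorem tb_spec : Claim_equal_tb := by
  intro steps arrLen _ hpre
  obtain ⟨h0, h1⟩ := hpre
  unfold Spec_tb
  rw [tb_eq_W steps arrLen h0 h1, alt_value steps arrLen h0]
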